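-- pv_equiv track=rewrite | github.com/JawadKotaichh/Codeforces | Divisions/Div 2 140/B_BinomialCoefficients.py | calculateWrongValues
-- ===== SOURCE A (Python) =====
-- MOD = 10**9 + 7
--
-- def calculateWrongValues(n,k):
--     C = [[0] * (n + 1) for _ in range(n + 1)]
--     for n in range(n + 1):
--         C[n][0] = 1
--         C[n][n] = 1
--         for x in range(1, n):
--             C[n][x] = (C[n][x - 1] + C[n - 1][x - 1]) % MOD
--     return C[n][k]
-- ===== SOURCE B (Python) =====
-- MOD = 10**9 + 7
--
-- def calculateWrongValues(n, k):
--     # closed form of A's wrong Pascal recurrence: row n is 1 at k == n, 2**k mod MOD elsewhere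
--     return 1 if k == n else pow(2, k, MOD)
-- ===== Notes on version B (the rewrite author's own statement) =====
-- stated objective: faster
-- what changed: B replaces the O(n^2) dynamic-programming table with the closed form of the wrong recurrence: 1 if k==n else 2^k mod 10^9+7 via modular fast exponentiation.
-- outside the precondition, e.g. on calculateWrongValues(3, -2): A returns 4, B returns 250000002; on calculateWrongValues(3, -1): A returns 1, B returns 500000004
import Mathlib
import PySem

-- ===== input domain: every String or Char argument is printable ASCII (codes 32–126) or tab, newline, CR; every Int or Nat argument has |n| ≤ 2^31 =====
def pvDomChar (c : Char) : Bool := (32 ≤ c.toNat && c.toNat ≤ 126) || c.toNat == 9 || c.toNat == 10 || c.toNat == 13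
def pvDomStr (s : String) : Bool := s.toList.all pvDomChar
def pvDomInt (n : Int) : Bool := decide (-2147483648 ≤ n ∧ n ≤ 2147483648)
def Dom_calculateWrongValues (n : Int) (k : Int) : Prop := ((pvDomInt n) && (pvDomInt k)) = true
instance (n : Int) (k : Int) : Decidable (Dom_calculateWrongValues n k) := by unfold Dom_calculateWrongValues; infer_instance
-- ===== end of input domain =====

-- B replaces A's O(n^2) wrong-Pascal table with the closed form 1 if k==n else 2^k mod 10^9+7.

-- ===== PORT A =====
def pvMOD : Int := 10 ^ 9 + 7   -- the module constant MOD (both Pythons define it)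

-- the inner-loop body: C[n][x] = (C[n][x-1] + C[n-1][x-1]) % MOD  (r is the row C[n] being mutated)
def pvF (C : List (List Int)) (m : Int) (r : List Int) (x : Int) : List Int :=
  PySem.List.pySetD r x
    (PySem.Int.mod (PySem.List.pyGetD r (x - 1) 0 +
      PySem.List.pyGetD (PySem.List.pyGetD C (m - 1) []) (x - 1) 0) pvMOD)

-- for x in range(1, n): …
def pvInner (C : List (List Int)) (m : Int) (row : List Int) : List Int :=
  (PySem.List.pyRange 1 m 1).foldl (pvF C m) row

-- one iteration of the outer loop: C[n][0] = 1; C[n][n] = 1; inner loop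
def pvStep (C : List (List Int)) (m : Int) : List (List Int) :=
  PySem.List.pySetD C m (pvInner C m
    (PySem.List.pySetD (PySem.List.pySetD (PySem.List.pyGetD C m []) 0 1) m 1))

def calculateWrongValues (n : Int) (k : Int) : Int :=
  -- C = [[0]*(n+1) for _ in range(n+1)]; the outer loop; then the final C[n][k]
  -- (pyGetD is Python's indexing, negative from the end; its default is unreachable under Pre_)
  PySem.List.pyGetD (PySem.List.pyGetD
    ((PySem.List.pyRange 0 (n + 1) 1).foldl pvStep
      (List.replicate (n + 1).toNat (List.replicate (n + 1).toNat (0 : Int)))) n []) k 0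

-- ===== PORT B =====
def calculateWrongValues_alt (n : Int) (k : Int) : Int :=
  if k == n then 1 else PySem.Int.powMod 2 k.toNat pvMOD

-- ===== PRECONDITION & SPEC =====
-- Pre_ excludes k > n, k < -(n+1) and n < 0, where A raises IndexError; it also excludes
-- -(n+1) <= k <= -1, a corner no caller of a binomial routine would specify: there A returns a
-- table entry picked by Python's negative-index wraparound while B returns pow(2,k,MOD), a
-- modular inverse — both values accidental, so those inputs are outside the claim.
def Pre_calculateWrongValues (n : Int) (k : Int) : Prop := 0 ≤ k ∧ k ≤ n
instance (n : Int) (k : Int) : Decidable (Pre_calculateWrongValues n k) := by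
  unfold Pre_calculateWrongValues; infer_instance

def pvWitness_calculateWrongValues : Int × Int := (3, 2)

def Spec_calculateWrongValues (n : Int) (k : Int) (out : Int) : Prop := out = calculateWrongValues_alt n k
instance (n : Int) (k : Int) (out : Int) : Decidable (Spec_calculateWrongValues n k out) := by
  unfold Spec_calculateWrongValues; infer_instance

-- ===== CLAIM (what is proved, stated in full; the proofs are below) =====
def Claim_equal_calculateWrongValues : Prop := ∀ (n : Int) (k : Int), Dom_calculateWrongValues n k → Pre_calculateWrongValues n k → Spec_calculateWrongValues n k (calculateWrongValues n k)

-- ===== LEMMAS AND PROOFS =====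

-- A's row m after the first t inner-loop steps: 1 at columns 0 and m, 2^x mod MOD at 1 ≤ x ≤ t, else 0
def pvPVal (m t x : Nat) : Int :=
  if x = m then 1 else if x = 0 then 1 else if x ≤ t then (2 : Int) ^ x % pvMOD else 0

def pvPRow (N m t : Nat) : List Int := (List.range N).map (pvPVal m t)

def pvRowFinal (N i : Nat) : List Int := pvPRow N i (i - 1)

lemma pv_set_map_range {α : Type} (N x : Nat) (f : Nat → α) (v : α) (_hx : x < N) :
    ((List.range N).map f).set x v = (List.range N).map (fun y => if y = x then v else f y) := by
  apply List.ext_getElem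
  · simp
  · intro i h1 h2
    simp only [List.getElem_set, List.getElem_map, List.getElem_range]
    split_ifs <;> first | rfl | omega

lemma pv_getD_pvPRow (N m t x : Nat) (hx : x < N) :
    (pvPRow N m t).getD x 0 = pvPVal m t x :=
  PySem.List.getD_map_range _ _ _ _ hx

lemma pv_mod_numeral : pvMOD = 1000000007 := by norm_num [pvMOD]

lemma pv_inner_aux (N m : Nat) (hm : m < N) (C : List (List Int))
    (hprev : C.getD (m - 1) [] = pvPRow N (m - 1) (m - 1 - 1)) :
    ∀ t : Nat, t + 1 ≤ m →
    (PySem.List.pyRange 1 (1 + (t : Int)) 1).foldl (pvF C (m : Int)) (pvPRow N m 0) =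
      pvPRow N m t := by
  intro t ht
  induction t with
  | zero =>
      rw [PySem.List.pyRange_one_eq_nil (by norm_num)]
      rfl
  | succ t ih =>
      have hrange : PySem.List.pyRange 1 (1 + ((t + 1 : Nat) : Int)) 1
          = PySem.List.pyRange 1 (1 + (t : Int)) 1 ++ [1 + (t : Int)] := by
        have h := PySem.List.pyRange_one_succ_right
          (a := 1) (b := 1 + (t : Int)) (by omega)
        have hc : (1 : Int) + ((t + 1 : Nat) : Int) = (1 + (t : Int)) + 1 := by push_cast; ring
        rw [hc, h]
      rw [hrange, List.foldl_append, ih (by omega)]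
      show pvF C (m : Int) (pvPRow N m t) (1 + (t : Int)) = pvPRow N m (t + 1)
      unfold pvF
      have hx1 : ((1 : Int) + (t : Int)) - 1 = ((t : Nat) : Int) := by ring
      have hmc : ((m : Int) - 1) = ((m - 1 : Nat) : Int) := by omega
      have hset : ((1 : Int) + (t : Int)) = ((t + 1 : Nat) : Int) := by push_cast; ring
      rw [hx1, hmc, PySem.List.pyGetD_natCast C (m - 1) [], hprev,
        PySem.List.pyGetD_natCast, PySem.List.pyGetD_natCast, hset, PySem.List.pySetD_natCast,
        pv_getD_pvPRow N m t t (by omega), pv_getD_pvPRow N (m - 1) (m - 1 - 1) t (by omega)]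
      unfold pvPRow
      rw [pv_set_map_range N (t + 1) _ _ (by omega)]
      apply List.map_congr_left
      intro y _
      by_cases hyx : y = t + 1
      · subst hyx
        rw [if_pos rfl]
        have e1 : pvPVal m t t = (if t = 0 then 1 else (2 : Int) ^ t % pvMOD) := by
          unfold pvPVal
          rw [if_neg (by omega : ¬ t = m)]
          split_ifs with h0 h1 <;> first | rfl | omega
        have e2 : pvPVal (m - 1) (m - 1 - 1) t = (if t = 0 then 1 else (2 : Int) ^ t % pvMOD) := by
          unfold pvPVal
          rw [if_neg (by omega : ¬ t = m - 1)]
          split_ifs with h0 h1 <;> first | rfl | omega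
        have e3 : pvPVal m (t + 1) (t + 1) = (2 : Int) ^ (t + 1) % pvMOD := by
          unfold pvPVal
          rw [if_neg (by omega : ¬ t + 1 = m), if_neg (by omega : ¬ t + 1 = 0),
            if_pos (by omega : t + 1 ≤ t + 1)]
        rw [e1, e2, e3, PySem.Int.mod_eq_emod_of_pos (by rw [pv_mod_numeral]; norm_num)]
        by_cases h0 : t = 0
        · subst h0
          rw [if_pos rfl, pv_mod_numeral]
          norm_num
        · rw [if_neg h0, pow_succ, pv_mod_numeral]
          generalize (2 : Int) ^ t = b
          omega
      · rw [if_neg hyx]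
        unfold pvPVal
        split_ifs <;> first | rfl | omega

lemma pv_row_init (N t : Nat) (_ht : t < N) :
    ((List.replicate N (0 : Int)).set 0 1).set t 1 = pvPRow N t 0 := by
  apply List.ext_getElem
  · simp [pvPRow]
  · intro i h1 h2
    simp only [List.getElem_set, List.getElem_replicate, pvPRow, pvPVal,
      List.getElem_map, List.getElem_range]
    split_ifs <;> first | rfl | omega

lemma pv_inner_full (N t : Nat) (ht : t < N) (C : List (List Int))
    (hprev : 2 ≤ t → C.getD (t - 1) [] = pvPRow N (t - 1) (t - 1 - 1)) :
    pvInner C (t : Int) (pvPRow N t 0) = pvRowFinal N t := by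
  by_cases h2 : 2 ≤ t
  · have hc : ((1 : Int) + ((t - 1 : Nat) : Int)) = (t : Int) := by omega
    have h := pv_inner_aux N t ht C (hprev h2) (t - 1) (by omega)
    rw [hc] at h
    exact h
  · have hnil : PySem.List.pyRange 1 (t : Int) 1 = [] :=
      PySem.List.pyRange_one_eq_nil (by omega)
    have ht1 : t - 1 = 0 := by omega
    unfold pvInner pvRowFinal
    rw [hnil, ht1]
    rfl

lemma pv_outer_spec (N : Nat) : ∀ t : Nat, t ≤ N →
    ((List.range t).map (fun j : Nat => (j : Int))).foldl pvStep
      (List.replicate N (List.replicate N (0 : Int))) =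
    (List.range N).map (fun i => if i < t then pvRowFinal N i else List.replicate N 0) := by
  intro t ht
  induction t with
  | zero =>
      simp [List.map_const']
  | succ t ih =>
      rw [List.range_succ, List.map_append, List.foldl_append, ih (by omega)]
      simp only [List.map_cons, List.map_nil, List.foldl_cons, List.foldl_nil]
      show pvStep _ (t : Int) = _
      unfold pvStep
      rw [PySem.List.pyGetD_natCast,
        PySem.List.getD_map_range _ _ _ _ (by omega : t < N),
        if_neg (by omega : ¬ t < t),
        PySem.List.pySetD_of_nonneg _ _ (by norm_num : (0:Int) ≤ 0), Int.toNat_zero,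
        PySem.List.pySetD_natCast, PySem.List.pySetD_natCast, pv_row_init N t (by omega),
        pv_inner_full N t (by omega) _ (fun h2 => by
          rw [PySem.List.getD_map_range _ _ _ _ (by omega : t - 1 < N),
            if_pos (by omega : t - 1 < t)]
          rfl),
        pv_set_map_range N t _ _ (by omega)]
      apply List.map_congr_left
      intro y _
      by_cases hyt : y = t
      · rw [if_pos hyt, hyt, if_pos (by omega : t < t + 1)]
      · rw [if_neg hyt]
        split_ifs <;> first | rfl | omega

-- ===== VERDICT (by name: the statement is the Claim_ definition above) =====
theorem calculateWrongValues_spec : Claim_equal_calculateWrongValues := by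
  intro n k _ hpre
  obtain ⟨hk0, hkn⟩ := hpre
  have hn : 0 ≤ n := le_trans hk0 hkn
  unfold Spec_calculateWrongValues calculateWrongValues calculateWrongValues_alt
  have hr : PySem.List.pyRange 0 (n + 1) 1 = (List.range (n + 1).toNat).map (fun j : Nat => (j : Int)) := by
    rw [PySem.List.pyRange_one]
    norm_num
  rw [hr, pv_outer_spec (n + 1).toNat (n + 1).toNat le_rfl]
  have hval : PySem.List.pyGetD
      ((List.range (n + 1).toNat).map
        (fun i => if i < (n + 1).toNat then pvRowFinal (n + 1).toNat i else List.replicate (n + 1).toNat 0)) n []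
      = pvRowFinal (n + 1).toNat n.toNat := by
    rw [PySem.List.pyGetD_of_nonneg _ _ hn,
      PySem.List.getD_map_range _ _ _ _ (by omega : n.toNat < (n + 1).toNat),
      if_pos (by omega : n.toNat < (n + 1).toNat)]
  rw [hval]
  have hrow : PySem.List.pyGetD (pvRowFinal (n + 1).toNat n.toNat) k 0
      = pvPVal n.toNat (n.toNat - 1) k.toNat := by
    rw [PySem.List.pyGetD_of_nonneg _ _ hk0]
    exact pv_getD_pvPRow _ _ _ _ (by omega)
  rw [hrow]
  by_cases hkeq : k = n
  · subst hkeq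
    rw [if_pos (by simp), pvPVal, if_pos rfl]
  · rw [if_neg (by simp [hkeq]),
      PySem.Int.powMod_eq_emod 2 k.toNat (by rw [pv_mod_numeral]; norm_num)]
    unfold pvPVal
    rw [if_neg (by omega : ¬ k.toNat = n.toNat)]
    by_cases h0 : k.toNat = 0
    · rw [if_pos h0, h0, pv_mod_numeral]
      norm_num
    · rw [if_neg h0, if_pos (by omega : k.toNat ≤ n.toNat - 1)]
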